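-- pv_equiv track=rewrite | github.com/ventii-inc/video-clone-backend | scripts/run_avatar.py | calculate_overall_progress
-- ===== SOURCE A (Python) =====
-- STEP_WEIGHTS = {
--     "init": 0,
--     "extract_frames": 20,
--     "load_frames": 10,
--     "face_detect": 50,
--     "save_faces": 10,
--     "finalize": 5,
--     "upload": 5,
--     "complete": 0,
-- }
--
-- STEP_ORDER = ["init", "extract_frames", "load_frames", "face_detect", "save_faces", "finalize", "upload", "complete"]
--
-- def get_step_index(step: str) -> int:
--     """Get step index for ordering."""
--     try:
--         return STEP_ORDER.index(step)
--     except ValueError: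
--         return -1
--
-- def calculate_overall_progress(step: str, step_progress: int) -> int:
--     """Calculate overall progress based on step and step progress."""
--     step_idx = get_step_index(step)
--     if step_idx < 0:
--         return 0
--
--     # Sum weights of completed steps
--     completed_weight = sum(STEP_WEIGHTS.get(s, 0) for s in STEP_ORDER[:step_idx])
--
--     # Add current step's partial progress
--     current_weight = STEP_WEIGHTS.get(step, 0)
--     partial = int(current_weight * step_progress / 100)
--
--     return min(100, completed_weight + partial)
-- ===== SOURCE B (Python) =====
-- STEP_WEIGHTS = {
--     "init": 0,
--     "extract_frames": 20,
--     "load_frames": 10,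
--     "face_detect": 50,
--     "save_faces": 10,
--     "finalize": 5,
--     "upload": 5,
--     "complete": 0,
-- }
--
-- STEP_ORDER = ["init", "extract_frames", "load_frames", "face_detect", "save_faces", "finalize", "upload", "complete"]
--
-- # Prefix-sum table built once: weight completed before each step.
-- STEP_CUMULATIVE = {}
-- _acc = 0
-- for _s in STEP_ORDER:
--     STEP_CUMULATIVE[_s] = _acc
--     _acc += STEP_WEIGHTS[_s]
--
--
-- def calculate_overall_progress(step: str, step_progress: int) -> int:
--     """Calculate overall progress based on step and step progress."""
--     if step not in STEP_CUMULATIVE: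
--         return 0
--     partial = int(STEP_WEIGHTS[step] * step_progress / 100)
--     return min(100, STEP_CUMULATIVE[step] + partial)
-- ===== Notes on version B (the rewrite author's own statement) =====
-- stated objective: simpler
-- what changed: Replaced the per-call linear index scan plus slice-and-sum over STEP_ORDER with a module-level prefix-sum table STEP_CUMULATIVE built once, so each call is a single dict lookup.
import Mathlib
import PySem

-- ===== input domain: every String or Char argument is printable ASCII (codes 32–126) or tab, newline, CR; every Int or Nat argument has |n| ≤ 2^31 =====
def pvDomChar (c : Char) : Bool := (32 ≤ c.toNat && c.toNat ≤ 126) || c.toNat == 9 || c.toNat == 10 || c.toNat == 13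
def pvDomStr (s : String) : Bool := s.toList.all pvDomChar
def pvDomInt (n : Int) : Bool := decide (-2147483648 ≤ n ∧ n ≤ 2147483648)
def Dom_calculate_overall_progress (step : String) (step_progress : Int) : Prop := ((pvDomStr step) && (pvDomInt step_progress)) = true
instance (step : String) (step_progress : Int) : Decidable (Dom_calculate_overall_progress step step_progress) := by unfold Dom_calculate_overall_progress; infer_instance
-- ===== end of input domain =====

-- B replaces A's per-call index scan and slice-and-sum with a prefix-sum table built once (objective: simpler calls).

-- ===== PORT A =====
def pvSTEP_WEIGHTS : PySem.Dict String Int :=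
  PySem.Dict.ofList [("init", 0), ("extract_frames", 20), ("load_frames", 10),
    ("face_detect", 50), ("save_faces", 10), ("finalize", 5), ("upload", 5), ("complete", 0)]

def pvSTEP_ORDER : List String :=
  ["init", "extract_frames", "load_frames", "face_detect", "save_faces", "finalize", "upload", "complete"]

def get_step_index (step : String) : Int :=
  match PySem.List.index? pvSTEP_ORDER step with
  | some i => (i : Int)
  | none => -1

def calculate_overall_progress (step : String) (step_progress : Int) : Int :=
  let step_idx := get_step_index step
  if step_idx < 0 then 0
  else
    let completed_weight :=
      ((PySem.List.slice pvSTEP_ORDER none (some step_idx)).map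
        (fun s => pvSTEP_WEIGHTS.getD s 0)).sum
    let current_weight := pvSTEP_WEIGHTS.getD step 0
    -- int(w * p / 100): float division then truncation toward zero; exact as truncdiv on this domain
    let «partial» := PySem.Int.truncdiv (current_weight * step_progress) 100
    min 100 (completed_weight + «partial»)

-- ===== PORT B =====
def pvSTEP_CUMULATIVE : PySem.Dict String Int :=
  (pvSTEP_ORDER.foldl
    (fun (acc : PySem.Dict String Int × Int) s =>
      (acc.1.insert s acc.2, acc.2 + pvSTEP_WEIGHTS.getD s 0))
    (PySem.Dict.empty, 0)).1

def calculate_overall_progress_alt (step : String) (step_progress : Int) : Int :=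
  match pvSTEP_CUMULATIVE.get? step with
  | none => 0
  | some completed =>
    let «partial» := PySem.Int.truncdiv (pvSTEP_WEIGHTS.getD step 0 * step_progress) 100
    min 100 (completed + «partial»)

-- ===== PRECONDITION & SPEC =====
def Spec_calculate_overall_progress (step : String) (step_progress : Int) (out : Int) : Prop := out = calculate_overall_progress_alt step step_progress
instance (step : String) (step_progress : Int) (out : Int) : Decidable (Spec_calculate_overall_progress step step_progress out) := by unfold Spec_calculate_overall_progress; infer_instance

-- ===== CLAIM (what is proved, stated in full; the proofs are below) =====
def Claim_equal_calculate_overall_progress : Prop := ∀ (step : String) (step_progress : Int), Dom_calculate_overall_progress step step_progress → Spec_calculate_overall_progress step step_progress (calculate_overall_progress step step_progress)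

-- ===== LEMMAS AND PROOFS =====

theorem step_case (step : String) (p : Int) (h : step ∈ pvSTEP_ORDER) :
    calculate_overall_progress step p = calculate_overall_progress_alt step p := by
  fin_cases h <;> rfl

theorem step_notin (step : String) (p : Int) (h : step ∉ pvSTEP_ORDER) :
    calculate_overall_progress step p = calculate_overall_progress_alt step p := by
  have hA : PySem.List.index? pvSTEP_ORDER step = none :=
    (PySem.List.index?_eq_none_iff _ _).mpr h
  have hB : pvSTEP_CUMULATIVE.get? step = none := by
    simp only [pvSTEP_ORDER, List.mem_cons, List.not_mem_nil, or_false, not_or] at h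
    obtain ⟨h1, h2, h3, h4, h5, h6, h7, h8⟩ := h
    show (PySem.Dict.mk _).get? step = none
    simp [pvSTEP_WEIGHTS, PySem.Dict.insert, PySem.Dict.empty,
      PySem.Dict.get?, Ne.symm h1, Ne.symm h2, Ne.symm h3, Ne.symm h4,
      Ne.symm h5, Ne.symm h6, Ne.symm h7, Ne.symm h8]
  rw [PySem.List.index?_eq_idxOf?] at hA
  simp [calculate_overall_progress, calculate_overall_progress_alt, get_step_index, hA, hB]

-- ===== VERDICT (by name: the statement is the Claim_ definition above) =====
theorem calculate_overall_progress_spec : Claim_equal_calculate_overall_progress := by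
  intro step p _
  show calculate_overall_progress step p = calculate_overall_progress_alt step p
  by_cases h : step ∈ pvSTEP_ORDER
  · exact step_case step p h
  · exact step_notin step p h
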